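-- pv_equiv track=rewrite | github.com/faceyacc/codecrafters-sqlite-python | app/main.py | text_map
-- ===== SOURCE A (Python) =====
-- def text_map(string_values):
--     """
--     Returns a dictionary representation of a table given a list of string values
--
--     Args:
--         string_values (list): A list of string values
--
--     Returns:
--         dict: A dictionary representation of the table
--     """
--     text_map = {}
--
--     for row in string_values:
--         for column_index in range(len(row)):
--             if column_index not in text_map:
--                 text_map[column_index] = []
--             text_map[column_index].append(row[column_index])
--     return text_map
-- ===== SOURCE B (Python) =====
-- def text_map(string_values):
--     n = max(map(len, string_values), default=0)
--     return {c: [row[c] for row in string_values if c < len(row)] for c in range(n)}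
-- ===== Notes on version B (the rewrite author's own statement) =====
-- stated objective: simpler
-- what changed: B builds the transpose column-major: it computes the number of columns as the maximum row length (0 for empty input) and emits each column in full as one comprehension, instead of A's row-major accumulation into a dict with membership tests and in-place appends.
import Mathlib
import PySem

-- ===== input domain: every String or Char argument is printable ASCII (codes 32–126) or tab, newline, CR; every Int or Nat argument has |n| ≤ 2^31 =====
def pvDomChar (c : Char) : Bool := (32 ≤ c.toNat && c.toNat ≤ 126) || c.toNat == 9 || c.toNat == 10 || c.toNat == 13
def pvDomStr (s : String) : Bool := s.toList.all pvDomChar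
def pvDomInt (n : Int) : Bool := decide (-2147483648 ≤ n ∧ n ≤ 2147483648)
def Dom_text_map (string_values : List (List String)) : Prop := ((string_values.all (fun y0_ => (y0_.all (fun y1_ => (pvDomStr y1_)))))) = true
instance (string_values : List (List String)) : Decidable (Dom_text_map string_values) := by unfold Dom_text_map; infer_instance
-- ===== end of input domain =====

-- B rebuilds the transpose column-major (whole column at a time) instead of A's row-major
-- dict accumulation; objective: simpler (no speed claim).

-- ===== PORT A =====
-- one inner-loop step: 'if column_index not in text_map: text_map[column_index] = []' then
-- 'text_map[column_index].append(row[column_index])' (the key is present after the if, so the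
-- append is Dict.modify with an unused default)
def tmStep (row : List String) (tm : PySem.Dict Int (List String)) (ci : Int) :
    PySem.Dict Int (List String) :=
  let tm := if tm.contains ci then tm else tm.insert ci ([] : List String)
  tm.modify ci [] (fun l => l ++ [PySem.List.pyGetD row ci ""])

-- 'for column_index in range(len(row)): …'
def tmRow (tm : PySem.Dict Int (List String)) (row : List String) :
    PySem.Dict Int (List String) :=
  (PySem.List.pyRange 0 (row.length : Int)).foldl (tmStep row) tm

def text_map (string_values : List (List String)) : List (Int × List String) :=
  (string_values.foldl tmRow PySem.Dict.empty).items

-- ===== PORT B =====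
def text_map_alt (string_values : List (List String)) : List (Int × List String) :=
  -- n = max(map(len, string_values), default=0), inlined into range(n)
  (PySem.List.pyRange 0
      (PySem.List.maxD (string_values.map (fun r => (r.length : Int))) (fun x => x) 0)).map (fun c =>
    (c, (string_values.filter (fun row => decide (c < (row.length : Int)))).map
          (fun row => PySem.List.pyGetD row c "")))

-- ===== PRECONDITION & SPEC =====
def Spec_text_map (string_values : List (List String)) (out : List (Int × List String)) : Prop := out = text_map_alt string_values
instance (string_values : List (List String)) (out : List (Int × List String)) : Decidable (Spec_text_map string_values out) := by unfold Spec_text_map; infer_instance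

-- ===== CLAIM (what is proved, stated in full; the proofs are below) =====
def Claim_equal_text_map : Prop := ∀ (string_values : List (List String)), Dom_text_map string_values → Spec_text_map string_values (text_map string_values)

-- ===== LEMMAS AND PROOFS =====

-- canonical description shared by both sides
def maxLen (sv : List (List String)) : Nat := sv.foldl (fun m r => max m r.length) 0

def colOf (sv : List (List String)) (c : Nat) : List String :=
  (sv.filter (fun r => decide (c < r.length))).map (fun r => r.getD c "")

def canon (sv : List (List String)) : List (Int × List String) :=
  (List.range (maxLen sv)).map (fun (c : Nat) => ((c : Int), colOf sv c))

theorem canon_nodup_fst (M : Nat) (h : Nat → List String) :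
    (((List.range M).map (fun (c : Nat) => ((c : Int), h c))).map Prod.fst).Nodup := by
  rw [List.map_map]
  exact (List.nodup_range).map (fun a b hab => by
    have : (a : Int) = b := hab
    exact_mod_cast this)

theorem contains_canon (M : Nat) (h : Nat → List String) (L : Nat) :
    (PySem.Dict.mk ((List.range M).map (fun (c : Nat) => ((c : Int), h c)))).contains (L : Nat) =
      decide (L < M) := by
  simp only [PySem.Dict.contains, List.any_map]
  by_cases hL : L < M
  · simp only [hL, decide_true]
    rw [List.any_eq_true]
    exact ⟨L, List.mem_range.mpr hL, by simp⟩
  · rw [decide_eq_false hL, List.any_eq_false]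
    intro x hx
    have hxM := List.mem_range.mp hx
    simp only [Function.comp_apply, beq_iff_eq, Int.natCast_inj]
    omega

theorem getD_canon (M : Nat) (h : Nat → List String) (L : Nat) (hL : L < M) :
    (PySem.Dict.mk ((List.range M).map (fun (c : Nat) => ((c : Int), h c)))).getD (L : Nat) [] = h L := by
  apply PySem.Dict.getD_of_mem_items
  · exact List.mem_map.mpr ⟨L, List.mem_range.mpr hL, rfl⟩
  · exact canon_nodup_fst M h

theorem insert_canon (M : Nat) (h : Nat → List String) (L : Nat) (hL : L < M) (w : List String) :
    (PySem.Dict.mk ((List.range M).map (fun (c : Nat) => ((c : Int), h c)))).insert (L : Nat) w =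
      PySem.Dict.mk ((List.range M).map (fun (c : Nat) => ((c : Int), if c = L then w else h c))) := by
  have hc : (PySem.Dict.mk ((List.range M).map (fun (c : Nat) => ((c : Int), h c)))).contains (L : Nat) = true := by
    rw [contains_canon]; simp [hL]
  simp only [PySem.Dict.insert, hc, if_pos]
  congr 1
  rw [List.map_map]
  refine List.map_congr_left ?_
  intro c _
  by_cases hcL : c = L
  · subst hcL; simp
  · have : ¬ ((c : Int) = (L : Int)) := by exact_mod_cast hcL
    simp [hcL, this]

-- one inner step at index L on a canonical dict
theorem tmStep_canon (row : List String) (M : Nat) (h : Nat → List String) (L : Nat) :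
    tmStep row (PySem.Dict.mk ((List.range M).map (fun (c : Nat) => ((c : Int), h c)))) (L : Nat) =
      if L < M then
        PySem.Dict.mk ((List.range M).map
          (fun (c : Nat) => ((c : Int), if c = L then h L ++ [row.getD L ""] else h c)))
      else
        PySem.Dict.mk ((List.range M).map (fun (c : Nat) => ((c : Int), h c)) ++
          [((L : Int), [row.getD L ""])]) := by
  by_cases hL : L < M
  · simp only [hL, if_pos]
    unfold tmStep
    rw [contains_canon]
    simp only [hL, decide_true, if_pos]
    simp only [PySem.Dict.modify, getD_canon M h L hL, PySem.List.pyGetD_natCast]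
    exact insert_canon M h L hL _
  · simp only [hL, if_neg, not_false_iff]
    unfold tmStep
    rw [contains_canon]
    simp only [hL, decide_false, Bool.false_eq_true, if_neg, not_false_iff]
    have hnc : (PySem.Dict.mk ((List.range M).map (fun (c : Nat) => ((c : Int), h c)))).contains (L : Nat) = false := by
      rw [contains_canon]; simp [hL]
    have hins : (PySem.Dict.mk ((List.range M).map (fun (c : Nat) => ((c : Int), h c)))).insert
        ((L : Nat) : Int) ([] : List String) =
        PySem.Dict.mk ((List.range M).map (fun (c : Nat) => ((c : Int), h c)) ++ [((L : Int), [])]) := by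
      simp only [PySem.Dict.insert, hnc]
      simp
    rw [hins]
    -- modify on the freshly appended key
    have hmem : (((L : Nat) : Int), ([] : List String)) ∈
        ((List.range M).map (fun (c : Nat) => ((c : Int), h c)) ++ [((L : Int), ([] : List String))]) := by
      simp
    have hnd : ((((List.range M).map (fun (c : Nat) => ((c : Int), h c)) ++
        [((L : Int), ([] : List String))]).map Prod.fst)).Nodup := by
      rw [List.map_append, List.map_map]
      refine List.Nodup.append ?_ (by simp) ?_
      · exact (List.nodup_range).map (fun a b hab => by
          have : (a : Int) = b := hab
          exact_mod_cast this)
      · intro x hx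
        simp only [List.mem_map, List.mem_range, Function.comp] at hx
        obtain ⟨c, hc, rfl⟩ := hx
        simp only [List.map_cons, List.map_nil, List.mem_singleton]
        intro he
        have : c = L := by exact_mod_cast he
        omega
    have hgd : (PySem.Dict.mk ((List.range M).map (fun (c : Nat) => ((c : Int), h c)) ++
        [((L : Int), ([] : List String))])).getD ((L : Nat) : Int) [] = [] :=
      PySem.Dict.getD_of_mem_items _ hmem hnd []
    have hcon : (PySem.Dict.mk ((List.range M).map (fun (c : Nat) => ((c : Int), h c)) ++
        [((L : Int), ([] : List String))])).contains ((L : Nat) : Int) = true := by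
      simp [PySem.Dict.contains]
    simp only [PySem.Dict.modify, hgd, PySem.List.pyGetD_natCast]
    simp only [PySem.Dict.insert, hcon, if_pos]
    congr 1
    rw [List.map_append, List.map_map]
    congr 1
    · refine List.map_congr_left ?_
      intro c hc
      have hcM : c < M := List.mem_range.mp hc
      have : ¬ ((c : Int) == (L : Int)) = true := by
        simp only [beq_iff_eq]
        intro he
        have : c = L := by exact_mod_cast he
        omega
      simp only [Function.comp_apply]
      rw [if_neg this]
    · simp

-- the inner loop over range L on a canonical dict
theorem inner_loop (row : List String) (L : Nat) :
    ∀ (M : Nat) (h : Nat → List String),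
    ((List.range L).foldl (fun d c => tmStep row d (c : Nat)) (PySem.Dict.mk ((List.range M).map (fun (c : Nat) => ((c : Int), h c))))) =
      PySem.Dict.mk ((List.range (max M L)).map
        (fun (c : Nat) => ((c : Int),
          (if c < M then h c else []) ++ (if c < L then [row.getD c ""] else [])))) := by
  induction L with
  | zero =>
    intro M h
    simp only [List.range_zero, List.foldl_nil, Nat.max_zero]
    congr 1
    refine List.map_congr_left ?_
    intro c hc
    have : c < M := List.mem_range.mp hc
    simp [this]
  | succ L ih =>
    intro M h
    rw [List.range_succ, List.foldl_append, ih M h, List.foldl_cons, List.foldl_nil,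
      tmStep_canon]
    by_cases hL : L < max M L
    · have hLM : L < M := by omega
      have hmax : max M L = M := by omega
      have hmax' : max M (L + 1) = M := by omega
      rw [if_pos hL]
      simp only [hmax, hmax']
      congr 1
      refine List.map_congr_left ?_
      intro c hc
      have hcM : c < M := List.mem_range.mp hc
      by_cases hcL : c = L
      · subst hcL; simp [hLM]
      · have h1 : c < L + 1 ↔ c < L := by omega
        simp [hcL, hcM, h1]
    · have hML : max M L = L := by omega
      have hM : M ≤ L := by omega
      have hmax' : max M (L + 1) = L + 1 := by omega
      rw [if_neg hL]
      simp only [hmax', hML]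
      congr 1
      rw [List.range_succ, List.map_append]
      congr 1
      · refine List.map_congr_left ?_
        intro c hc
        have hcL : c < L := List.mem_range.mp hc
        have h1 : c < L + 1 := by omega
        by_cases hcM : c < M
        · simp [hcM, hcL, h1]
        · simp [hcM, hcL, h1]
      · have : ¬ L < M := by omega
        simp [this]

-- every row is at most maxLen long, so columns past maxLen are empty
theorem colOf_eq_nil (sv : List (List String)) (c : Nat) (hc : maxLen sv ≤ c) :
    colOf sv c = [] := by
  unfold colOf
  have hall : ∀ r ∈ sv, r.length ≤ maxLen sv :=
    (PySem.List.le_foldl_max_nat sv List.length 0).2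
  rw [List.filter_eq_nil_iff.mpr]
  · rfl
  · intro r hr
    have := hall r hr
    simp only [decide_eq_true_eq]
    omega

theorem maxLen_append (sv : List (List String)) (r : List String) :
    maxLen (sv ++ [r]) = max (maxLen sv) r.length := by
  unfold maxLen
  rw [List.foldl_append]
  rfl

theorem colOf_append (sv : List (List String)) (r : List String) (c : Nat) :
    colOf (sv ++ [r]) c = colOf sv c ++ (if c < r.length then [r.getD c ""] else []) := by
  unfold colOf
  rw [List.filter_append, List.map_append]
  congr 1
  by_cases h : c < r.length <;> simp [h]

-- A's whole fold produces the canonical transpose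
theorem A_fold_canon (sv : List (List String)) :
    sv.foldl tmRow PySem.Dict.empty = PySem.Dict.mk (canon sv) := by
  induction sv using List.reverseRecOn with
  | nil => rfl
  | append_singleton sv r ih =>
    rw [List.foldl_append, List.foldl_cons, List.foldl_nil, ih]
    unfold tmRow
    rw [PySem.List.pyRange_zero_natCast, List.foldl_map]
    unfold canon
    rw [inner_loop r r.length (maxLen sv) (colOf sv)]
    rw [maxLen_append]
    congr 1
    refine List.map_congr_left ?_
    intro c hc
    have hcm : c < max (maxLen sv) r.length := List.mem_range.mp hc
    rw [colOf_append]
    by_cases hcM : c < maxLen sv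
    · simp [hcM]
    · rw [colOf_eq_nil sv c (by omega)]
      simp [hcM]

-- B computes the same canonical transpose
theorem int_foldl_max_cast (t : List (List String)) (a : Nat) :
    List.foldl max ((a : Nat) : Int) (t.map (fun r => (r.length : Int))) =
      ((t.foldl (fun m r => max m r.length) a : Nat) : Int) := by
  induction t generalizing a with
  | nil => rfl
  | cons r t ih =>
    simp only [List.map_cons, List.foldl_cons]
    rw [← Nat.cast_max, ih]

theorem B_maxD (sv : List (List String)) :
    PySem.List.maxD (sv.map (fun r => (r.length : Int))) (fun x => x) 0 =
      ((maxLen sv : Nat) : Int) := by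
  cases sv with
  | nil => rfl
  | cons r t =>
    unfold PySem.List.maxD
    rw [List.map_cons, PySem.List.max?_id_cons]
    simp only [Option.getD_some]
    have : maxLen (r :: t) = t.foldl (fun m r => max m r.length) r.length := by
      unfold maxLen
      simp
    rw [this, ← int_foldl_max_cast]

theorem B_canon (sv : List (List String)) : text_map_alt sv = canon sv := by
  unfold text_map_alt
  rw [B_maxD, PySem.List.pyRange_zero_natCast, List.map_map]
  unfold canon colOf
  refine List.map_congr_left ?_
  intro c _
  simp only [Function.comp_apply]
  have hf : sv.filter (fun row => decide ((c : Int) < (row.length : Int))) =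
      sv.filter (fun r => decide (c < r.length)) := by
    refine List.filter_congr ?_
    intro r _
    simp
  rw [hf]
  congr 1
  refine List.map_congr_left ?_
  intro r _
  exact PySem.List.pyGetD_natCast r c ""

-- ===== VERDICT (by name: the statement is the Claim_ definition above) =====
theorem text_map_spec : Claim_equal_text_map := by
  intro sv _
  unfold Spec_text_map
  rw [B_canon]
  unfold text_map
  rw [A_fold_canon]
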